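-- pv_equiv track=rewrite | github.com/BianchiniLuca/pythagorean-inverse-system-135 | src/pythagorean_inverse_system_135/validators.py | violates_forbidden_bigrams
-- ===== SOURCE A (Python) =====
-- from typing import Iterable, Optional, Sequence, Set, Tuple
--
-- Bigram = Tuple[int, int]
--
-- def iter_bigrams(seq: Sequence[int], cyclic: bool) -> Iterable[Bigram]:
--     """Yield adjacent bigrams. If cyclic=True, include last->first."""
--     if len(seq) < 2:
--         return
--     for i in range(len(seq) - 1):
--         yield (seq[i], seq[i + 1])
--     if cyclic and len(seq) >= 2:
--         yield (seq[-1], seq[0])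
--
-- def violates_forbidden_bigrams(
--     seq: Sequence[int],
--     forbidden: Optional[Set[Bigram]],
--     cyclic: bool,
-- ) -> bool:
--     if not forbidden:
--         return False
--     for bg in iter_bigrams(seq, cyclic=cyclic):
--         if bg in forbidden:
--             return True
--     return False
-- ===== SOURCE B (Python) =====
-- def violates_forbidden_bigrams(seq, forbidden, cyclic):
--     if not forbidden:
--         return False
--     # Build a successor index: element -> set of elements that follow it adjacently.
--     succ = {}
--     for a, b in zip(seq, seq[1:]):
--         succ.setdefault(a, set()).add(b)
--     if cyclic and len(seq) >= 2:
--         succ.setdefault(seq[-1], set()).add(seq[0])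
--     # Invert the loop: scan the forbidden pairs and answer by index lookup.
--     return any(b in succ.get(a, ()) for a, b in forbidden)
-- ===== Notes on version B (the rewrite author's own statement) =====
-- stated objective: alternative
-- what changed: B builds an inverted successor index (dict element -> set of adjacent successors) from the sequence, then iterates over the forbidden pairs answering each by an O(1) index lookup, instead of A's generator over bigrams with a per-bigram membership test in forbidden.
import Mathlib
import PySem

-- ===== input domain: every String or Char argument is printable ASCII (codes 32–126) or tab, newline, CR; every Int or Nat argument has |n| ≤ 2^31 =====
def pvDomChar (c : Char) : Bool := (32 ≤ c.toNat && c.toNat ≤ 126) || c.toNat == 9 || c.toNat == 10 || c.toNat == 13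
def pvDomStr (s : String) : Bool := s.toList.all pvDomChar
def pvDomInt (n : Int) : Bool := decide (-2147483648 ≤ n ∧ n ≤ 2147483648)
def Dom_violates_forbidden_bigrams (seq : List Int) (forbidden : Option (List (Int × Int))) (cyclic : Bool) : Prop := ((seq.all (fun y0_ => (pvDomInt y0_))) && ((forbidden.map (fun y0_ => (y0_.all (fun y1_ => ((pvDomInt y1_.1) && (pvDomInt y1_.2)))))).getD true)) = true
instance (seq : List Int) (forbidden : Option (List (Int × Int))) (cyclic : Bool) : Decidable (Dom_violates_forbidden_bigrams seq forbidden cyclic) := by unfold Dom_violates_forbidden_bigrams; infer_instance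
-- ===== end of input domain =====

-- B replaces A's bigram generator + per-bigram membership loop by an inverted successor index
-- (dict: element -> set of adjacent successors) built once, then a scan over the forbidden pairs
-- answered by index lookup (objective: alternative).


-- ===== PORT A =====
-- helper for A: the iter_bigrams generator, yielding (seq[i], seq[i+1]) for each i, plus (seq[-1], seq[0]) if cyclic
def bigramsAux : List Int → List (Int × Int)
  | a :: b :: rest => (a, b) :: bigramsAux (b :: rest)
  | _ => []

def iter_bigrams (seq : List Int) (cyclic : Bool) : List (Int × Int) :=
  if seq.length < 2 then []
  else bigramsAux seq ++ (if cyclic then [(seq.getLastD 0, seq.headD 0)] else [])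
  -- seq[-1]/seq[0] are in range here since seq.length ≥ 2, so getLastD/headD are exact

def violates_forbidden_bigrams (seq : List Int) (forbidden : Option (List (Int × Int))) (cyclic : Bool) : Bool :=
  match forbidden with
  | none => false
  | some f =>
    if f.isEmpty then false
    else (iter_bigrams seq cyclic).any (fun bg => f.contains bg)

-- ===== PORT B =====
-- succ.setdefault(a, set()).add(b) mutates the stored set: exactly succ[a] = succ.get(a, set()).add(b),
-- i.e. Dict.modify a ∅ (·.add b).
def violates_forbidden_bigrams_alt (seq : List Int) (forbidden : Option (List (Int × Int))) (cyclic : Bool) : Bool :=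
  match forbidden with
  | none => false
  | some f =>
    if f.isEmpty then false
    else
      -- for a, b in zip(seq, seq[1:]): succ.setdefault(a, set()).add(b)
      let succ0 : PySem.Dict Int (PySem.Set Int) :=
        (seq.zip seq.tail).foldl (fun d p => d.modify p.1 [] (fun s => PySem.Set.add s p.2)) PySem.Dict.empty
      -- if cyclic and len(seq) >= 2: succ.setdefault(seq[-1], set()).add(seq[0])
      let succ := if cyclic && decide (2 ≤ seq.length)
                  then succ0.modify (seq.getLastD 0) [] (fun s => PySem.Set.add s (seq.headD 0))
                  else succ0
      -- any(b in succ.get(a, ()) for a, b in forbidden)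
      f.any (fun p => PySem.Set.contains (succ.getD p.1 []) p.2)

-- ===== PRECONDITION & SPEC =====
def Spec_violates_forbidden_bigrams (seq : List Int) (forbidden : Option (List (Int × Int))) (cyclic : Bool) (out : Bool) : Prop := out = violates_forbidden_bigrams_alt seq forbidden cyclic
instance (seq : List Int) (forbidden : Option (List (Int × Int))) (cyclic : Bool) (out : Bool) : Decidable (Spec_violates_forbidden_bigrams seq forbidden cyclic out) := by unfold Spec_violates_forbidden_bigrams; infer_instance

-- ===== CLAIM =====
def Claim_equal_violates_forbidden_bigrams : Prop := ∀ (seq : List Int) (forbidden : Option (List (Int × Int))) (cyclic : Bool), Dom_violates_forbidden_bigrams seq forbidden cyclic → Spec_violates_forbidden_bigrams seq forbidden cyclic (violates_forbidden_bigrams seq forbidden cyclic)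

-- ===== LEMMAS AND PROOFS =====

theorem bigramsAux_eq_zip (seq : List Int) : bigramsAux seq = seq.zip seq.tail := by
  induction seq with
  | nil => rfl
  | cons a rest ih =>
    cases rest with
    | nil => rfl
    | cons b r => simp [bigramsAux, ih]

theorem mem_iter_iff (seq : List Int) (cyclic : Bool) (x : Int × Int) :
    x ∈ iter_bigrams seq cyclic ↔
      (x ∈ seq.zip seq.tail ∨ ((cyclic && decide (2 ≤ seq.length)) = true ∧ x = (seq.getLastD 0, seq.headD 0))) := by
  unfold iter_bigrams
  by_cases h : seq.length < 2
  · have hz : seq.zip seq.tail = [] := by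
      match seq, h with
      | [], _ => rfl
      | [a], _ => rfl
    have h2 : ¬ (2 ≤ seq.length) := by omega
    simp [h, hz, h2]
  · have h2 : 2 ≤ seq.length := by omega
    rw [if_neg h]
    cases cyclic <;> simp [bigramsAux_eq_zip, h2]

-- membership in the successor index built by the modify-fold = membership in the start dict or in the pair list
theorem mem_getD_foldl_modify_add (ps : List (Int × Int)) (d : PySem.Dict Int (PySem.Set Int)) (a b : Int) :
    b ∈ (ps.foldl (fun d p => d.modify p.1 [] (fun s => PySem.Set.add s p.2)) d).getD a []
      ↔ b ∈ d.getD a [] ∨ (a, b) ∈ ps := by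
  induction ps generalizing d with
  | nil => simp [List.foldl]
  | cons p rest ih =>
    simp only [List.foldl_cons, ih, PySem.Dict.getD_modify, List.mem_cons]
    by_cases hk : a = p.1
    · subst hk
      simp [PySem.Set.mem_add, Prod.ext_iff]
      tauto
    · simp [hk, Prod.ext_iff]

theorem mem_succ_iff (seq : List Int) (cyclic : Bool) (a b : Int) :
    b ∈ ((if cyclic && decide (2 ≤ seq.length)
          then ((seq.zip seq.tail).foldl (fun d p => d.modify p.1 [] (fun s => PySem.Set.add s p.2)) PySem.Dict.empty).modify (seq.getLastD 0) [] (fun s => PySem.Set.add s (seq.headD 0))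
          else (seq.zip seq.tail).foldl (fun d p => d.modify p.1 [] (fun s => PySem.Set.add s p.2)) PySem.Dict.empty).getD a []) ↔
      ((a, b) ∈ seq.zip seq.tail ∨ ((cyclic && decide (2 ≤ seq.length)) = true ∧ (a, b) = (seq.getLastD 0, seq.headD 0))) := by
  by_cases hc : (cyclic && decide (2 ≤ seq.length)) = true
  · rw [if_pos hc, PySem.Dict.getD_modify]
    by_cases hk : a = seq.getLastD 0
    · subst hk
      simp [PySem.Set.mem_add, mem_getD_foldl_modify_add, PySem.Dict.getD_empty, hc, Prod.ext_iff]
    · rw [if_neg hk]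
      simp [mem_getD_foldl_modify_add, PySem.Dict.getD_empty, hc, Prod.ext_iff]
      intro h
      exact absurd h (by simpa using hk)
  · rw [if_neg hc]
    simp [mem_getD_foldl_modify_add, PySem.Dict.getD_empty, hc]

-- ===== VERDICT =====
theorem violates_forbidden_bigrams_spec : Claim_equal_violates_forbidden_bigrams := by
  intro seq forbidden cyclic _
  unfold Spec_violates_forbidden_bigrams violates_forbidden_bigrams violates_forbidden_bigrams_alt
  cases forbidden with
  | none => rfl
  | some f =>
    by_cases hf : f.isEmpty
    · simp [hf]
    · simp only [hf, if_neg, Bool.false_eq_true, not_false_iff]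
      rw [Bool.eq_iff_iff]
      simp only [List.any_eq_true, PySem.Set.contains, List.contains_eq_mem, decide_eq_true_eq]
      constructor
      · rintro ⟨x, hx, hxf⟩
        refine ⟨x, hxf, ?_⟩
        rw [mem_succ_iff]
        exact (mem_iter_iff seq cyclic x).1 hx
      · rintro ⟨p, hpf, hps⟩
        rw [mem_succ_iff] at hps
        exact ⟨p, (mem_iter_iff seq cyclic p).2 hps, hpf⟩
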